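-- pv_equiv track=rewrite | github.com/lihaojia24/leetcode | python/lcp_33.py | storeWater
-- ===== SOURCE A (Python) =====
-- from typing import List
--
-- def storeWater(bucket: List[int], vat: List[int]) -> int:
--     mx = max(vat)
--     if mx == 0: return 0
--     ans = 10 ** 4 + 1
--     for x in range(1, mx + 1):
--         tmp = x
--         for b, v in zip(bucket, vat):
--             tmp += max(0, (v + x - 1) // x - b)
--         ans = min(ans, tmp)
--     return ans
-- ===== SOURCE B (Python) =====
-- def storeWater(bucket, vat):
--     # Sqrt decomposition: for each (b, v) pair, ceil(v/x) is piecewise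
--     # constant in x with O(sqrt(|v|)) pieces; add each piece's cost to a
--     # difference array, then one sweep over x takes the minimum.
--     mx = max(vat)
--     if mx == 0:
--         return 0
--     diff = [0] * (mx + 2)
--     for b, v in zip(bucket, vat):
--         lo = 1
--         while lo <= mx:
--             q = -((-v) // lo)  # ceil(v / lo)
--             if v > 0:
--                 hi = mx if q == 1 else min(mx, (v - 1) // (q - 1))
--             else:
--                 hi = mx if q == 0 else min(mx, (-v) // (-q))
--             c = q - b
--             if c > 0:
--                 diff[lo] += c
--                 diff[hi + 1] -= c
--             lo = hi + 1
--     ans = 10 ** 4 + 1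
--     cur = 0
--     for x in range(1, mx + 1):
--         cur += diff[x]
--         ans = min(ans, x + cur)
--     return ans
-- ===== Notes on version B (the rewrite author's own statement) =====
-- stated objective: faster
-- what changed: Instead of evaluating the full cost sum for every x in 1..max(vat), B decomposes each pair's cost ceil(v/x)-b into the O(sqrt(v)) intervals of x where it is constant, accumulates them in a difference array, and finds the minimum in one prefix-sum sweep.
import Mathlib
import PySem

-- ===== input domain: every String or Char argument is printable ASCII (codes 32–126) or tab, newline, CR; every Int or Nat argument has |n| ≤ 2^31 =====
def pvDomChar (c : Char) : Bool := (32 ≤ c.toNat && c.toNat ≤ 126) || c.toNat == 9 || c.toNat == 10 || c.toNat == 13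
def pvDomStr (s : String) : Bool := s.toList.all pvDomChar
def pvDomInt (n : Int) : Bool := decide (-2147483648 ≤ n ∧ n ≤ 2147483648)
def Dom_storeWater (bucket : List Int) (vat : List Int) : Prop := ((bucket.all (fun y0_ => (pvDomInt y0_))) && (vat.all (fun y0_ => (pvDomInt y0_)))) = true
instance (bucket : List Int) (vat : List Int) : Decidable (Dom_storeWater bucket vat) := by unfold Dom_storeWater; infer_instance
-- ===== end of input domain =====

-- B replaces A's O(max(vat)·n) scan with a per-bucket sqrt-decomposition of
-- ceil(v/x) into constant intervals added to a difference array, then one sweep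
-- (objective: faster, O(max(vat) + n·sqrt(max(vat)))).

-- ===== PORT A =====
def storeWater (bucket : List Int) (vat : List Int) : Int :=
  match PySem.List.max? vat (fun y => y) with
  | none => 0   -- max([]) raises ValueError: excluded by Pre_storeWater
  | some mx =>
    if mx = 0 then 0
    else
      (PySem.List.pyRange 1 (mx + 1) 1).foldl
        (fun ans x =>
          let tmp := (List.zip bucket vat).foldl
            (fun tmp bv => tmp + max 0 (PySem.Int.floordiv (bv.2 + x - 1) x - bv.1)) x
          min ans tmp)
        (10 ^ 4 + 1)

-- ===== PORT B =====
-- point update of the diff table: Python's `diff[i] += d` (the Python list is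
-- ported as the function i ↦ diff[i]; every index written lies in [1, mx+1])
def pvUpd (f : Int → Int) (i d : Int) : Int → Int :=
  fun j => if j = i then f j + d else f j

-- the `hi` computed in B's while-loop body (end of the constant interval of ceil(v/x))
def pvHi (v mx lo : Int) : Int :=
  let q := -(PySem.Int.floordiv (-v) lo)
  if v > 0 then (if q = 1 then mx else min mx (PySem.Int.floordiv (v - 1) (q - 1)))
  else (if q = 0 then mx else min mx (PySem.Int.floordiv (-v) (-q)))

-- termination fact for the while-loop: the next lo (= hi + 1) strictly advances
theorem pvHi_lower (v mx lo : Int) (h1 : 1 ≤ lo) (h2 : lo ≤ mx) : lo ≤ pvHi v mx lo := by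
  unfold pvHi
  have hlo : (0:Int) < lo := by omega
  obtain ⟨hq1, hq2⟩ := (PySem.Int.neg_floordiv_neg_eq_iff_of_pos (a := v) (b := lo) hlo).mp rfl
  set q := -(PySem.Int.floordiv (-v) lo) with hq
  by_cases hv : v > 0
  · simp only [hv, if_true]
    have hqpos : 1 ≤ q := by nlinarith
    by_cases hq1' : q = 1
    · simp [hq1', h2]
    · simp only [hq1', if_false, le_min_iff]
      refine ⟨h2, ?_⟩
      rw [PySem.Int.le_floordiv_iff_mul_le (by omega)]
      nlinarith
  · simp only [hv, if_false]
    have hqneg : q ≤ 0 := by nlinarith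
    by_cases hq0 : q = 0
    · simp [hq0, h2]
    · simp only [hq0, if_false, le_min_iff]
      refine ⟨h2, ?_⟩
      rw [PySem.Int.le_floordiv_iff_mul_le (by omega)]
      nlinarith

-- B's inner while-loop for one (b, v) pair: walk the constant intervals of
-- ceil(v/x) on [lo, mx], adding the interval's cost to the difference table
def addPair (mx b v : Int) (lo : Int) (diff : Int → Int) : Int → Int :=
  if h : 1 ≤ lo ∧ lo ≤ mx then
    let q := -(PySem.Int.floordiv (-v) lo)
    let hi := pvHi v mx lo
    let c := q - b
    addPair mx b v (hi + 1) (if 0 < c then pvUpd (pvUpd diff lo c) (hi + 1) (-c) else diff)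
  else diff
termination_by (mx + 1 - lo).toNat
decreasing_by
  have := pvHi_lower v mx lo h.1 h.2
  omega

def storeWater_alt (bucket : List Int) (vat : List Int) : Int :=
  match PySem.List.max? vat (fun y => y) with
  | none => 0   -- max([]) raises ValueError: excluded by Pre_storeWater
  | some mx =>
    if mx = 0 then 0
    else
      let diff := (List.zip bucket vat).foldl (fun d bv => addPair mx bv.1 bv.2 1 d) (fun _ => 0)
      ((PySem.List.pyRange 1 (mx + 1) 1).foldl
        (fun (p : Int × Int) x =>
          let cur := p.2 + diff x
          (min p.1 (x + cur), cur))
        (10 ^ 4 + 1, 0)).1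

-- ===== PRECONDITION & SPEC =====
-- Pre_ excludes only the empty vat, on which A's max(vat) raises ValueError.
def Pre_storeWater (bucket : List Int) (vat : List Int) : Prop := vat ≠ []
instance (bucket : List Int) (vat : List Int) : Decidable (Pre_storeWater bucket vat) := by unfold Pre_storeWater; infer_instance
def pvWitness_storeWater : List Int × List Int := ([1, 2], [3, 7])

def Spec_storeWater (bucket : List Int) (vat : List Int) (out : Int) : Prop := out = storeWater_alt bucket vat
instance (bucket : List Int) (vat : List Int) (out : Int) : Decidable (Spec_storeWater bucket vat out) := by unfold Spec_storeWater; infer_instance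

-- ===== CLAIM (what is proved, stated in full; the proofs are below) =====
def Claim_equal_storeWater : Prop := ∀ (bucket : List Int) (vat : List Int), Dom_storeWater bucket vat → Pre_storeWater bucket vat → Spec_storeWater bucket vat (storeWater bucket vat)

-- ===== LEMMAS AND PROOFS =====

-- ceiling division: bounds of q = ceil(v/x)
theorem pvCeil_bounds (v x : Int) (hx : 0 < x) :
    (-(PySem.Int.floordiv (-v) x) - 1) * x < v ∧ v ≤ -(PySem.Int.floordiv (-v) x) * x :=
  (PySem.Int.neg_floordiv_neg_eq_iff_of_pos (a := v) (b := x) hx).mp rfl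

-- A's expression (v + x - 1) // x computes the same ceiling as B's -((-v) // x)
theorem pvCeilA_eq (v x : Int) (hx : 0 < x) :
    PySem.Int.floordiv (v + x - 1) x = -(PySem.Int.floordiv (-v) x) := by
  obtain ⟨h1, h2⟩ := pvCeil_bounds v x hx
  rw [PySem.Int.floordiv_eq_iff_of_pos hx]
  constructor <;> nlinarith

-- ceil(v/x) is constant on [lo, pvHi v mx lo]
theorem pvCeil_const (v mx lo x : Int) (h1 : 1 ≤ lo) (hlx : lo ≤ x) (hxh : x ≤ pvHi v mx lo) :
    -(PySem.Int.floordiv (-v) x) = -(PySem.Int.floordiv (-v) lo) := by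
  have hlo : (0:Int) < lo := by omega
  have hx : (0:Int) < x := by omega
  obtain ⟨hq1, hq2⟩ := pvCeil_bounds v lo hlo
  set q := -(PySem.Int.floordiv (-v) lo) with hq
  rw [PySem.Int.neg_floordiv_neg_eq_iff_of_pos (a := v) (b := x) (q := q) hx]
  unfold pvHi at hxh
  rw [← hq] at hxh
  by_cases hv : v > 0
  · simp only [hv, if_true] at hxh
    have hqpos : 1 ≤ q := by nlinarith
    by_cases hq1' : q = 1
    · rw [hq1'] at hq2 ⊢; constructor <;> nlinarith
    · simp only [hq1', if_false, le_min_iff] at hxh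
      have := (PySem.Int.le_floordiv_iff_mul_le (q := x) (a := v - 1) (b := q - 1) (by omega)).mp hxh.2
      constructor <;> nlinarith
  · simp only [hv, if_false] at hxh
    have hqneg : q ≤ 0 := by nlinarith
    by_cases hq0 : q = 0
    · rw [hq0] at hq1 ⊢; constructor <;> nlinarith
    · simp only [hq0, if_false, le_min_iff] at hxh
      have := (PySem.Int.le_floordiv_iff_mul_le (q := x) (a := -v) (b := -q) (by omega)).mp hxh.2
      constructor <;> nlinarith

-- prefix sum of the diff table over x = 1..n
def pvPf (f : Int → Int) (n : Nat) : Int := ∑ i ∈ Finset.range n, f (1 + (i : Int))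

theorem pvPf_succ (f : Int → Int) (n : Nat) : pvPf f (n + 1) = pvPf f n + f (1 + (n : Int)) := by
  unfold pvPf; rw [Finset.sum_range_succ]

theorem pvPf_upd (f : Int → Int) (i d : Int) (n : Nat) :
    pvPf (pvUpd f i d) n = pvPf f n + (if 1 ≤ i ∧ i ≤ (n : Int) then d else 0) := by
  induction n with
  | zero => simp [pvPf]; omega
  | succ n ih =>
    rw [pvPf_succ, pvPf_succ, ih]
    unfold pvUpd
    by_cases h : (1 : Int) + (n : Int) = i
    · have h1 : 1 ≤ i ∧ i ≤ ((n : Int) + 1) := by omega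
      have h2 : ¬ (1 ≤ i ∧ i ≤ (n : Int)) := by omega
      simp only [h, if_true, h2, if_false]
      push_cast
      simp only [h1, if_true, and_self]
      ring
    · simp only [h, if_false]
      by_cases h1 : 1 ≤ i ∧ i ≤ (n : Int)
      · have h2 : 1 ≤ i ∧ i ≤ ((n : Int) + 1) := by omega
        push_cast
        simp only [h1, if_true, h2, and_self]
        ring
      · have h2 : ¬ (1 ≤ i ∧ i ≤ ((n : Int) + 1)) := by omega
        push_cast
        simp only [h1, if_false]
        simp only [show ¬(1 ≤ i ∧ i ≤ (n : Int) + 1) from h2, if_false]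
        ring

-- the cost of one pair at multiplier x
def pvCp (b v x : Int) : Int := max 0 (-(PySem.Int.floordiv (-v) x) - b)

-- per-pair correctness: addPair adds exactly pvCp b v x to every prefix 1..x with lo ≤ x ≤ mx
theorem addPair_prefix (mx b v x : Int) (hx1 : 1 ≤ x) (hx2 : x ≤ mx) :
    ∀ (m : Nat) (lo : Int) (diff : Int → Int), (mx + 1 - lo).toNat ≤ m → 1 ≤ lo →
    pvPf (addPair mx b v lo diff) x.toNat
      = pvPf diff x.toNat + (if lo ≤ x then pvCp b v x else 0) := by
  intro m
  induction m with
  | zero =>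
    intro lo diff hm hlo
    rw [addPair]
    have h : ¬ (1 ≤ lo ∧ lo ≤ mx) := by omega
    rw [dif_neg h]
    have : ¬ lo ≤ x := by omega
    simp [this]
  | succ m ih =>
    intro lo diff hm hlo
    rw [addPair]
    by_cases h : 1 ≤ lo ∧ lo ≤ mx
    · rw [dif_pos h]
      have hhi := pvHi_lower v mx lo h.1 h.2
      set q := -(PySem.Int.floordiv (-v) lo) with hq
      set hi := pvHi v mx lo with hhidef
      set c := q - b with hc
      have hxInt : ((x.toNat : Int)) = x := by omega
      have hrec := ih (hi + 1) (if 0 < c then pvUpd (pvUpd diff lo c) (hi + 1) (-c) else diff)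
        (by omega) (by omega)
      rw [hrec]
      -- pvCp is constant (= max 0 c) on [lo, hi]
      have hconst : ∀ y : Int, lo ≤ y → y ≤ hi → pvCp b v y = max 0 c := by
        intro y h1 h2
        unfold pvCp
        rw [pvCeil_const v mx lo y h.1 h1 (by rw [hhidef] at h2; exact h2), ← hq, ← hc]
      by_cases hcpos : 0 < c
      · rw [if_pos hcpos, pvPf_upd, pvPf_upd, hxInt]
        by_cases h1 : lo ≤ x
        · by_cases h2 : hi + 1 ≤ x
          · rw [if_pos (show 1 ≤ lo ∧ lo ≤ x from ⟨h.1, h1⟩),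
                if_pos (show 1 ≤ hi + 1 ∧ hi + 1 ≤ x by omega), if_pos h2, if_pos h1]
            ring
          · rw [if_pos (show 1 ≤ lo ∧ lo ≤ x from ⟨h.1, h1⟩),
                if_neg (show ¬ (1 ≤ hi + 1 ∧ hi + 1 ≤ x) by omega), if_neg h2, if_pos h1,
                hconst x h1 (by omega), max_eq_right (le_of_lt hcpos)]
            ring
        · rw [if_neg (show ¬ (1 ≤ lo ∧ lo ≤ x) by omega),
              if_neg (show ¬ (1 ≤ hi + 1 ∧ hi + 1 ≤ x) by omega),
              if_neg (show ¬ (hi + 1 ≤ x) by omega), if_neg h1]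
          ring
      · rw [if_neg hcpos]
        by_cases h2 : hi + 1 ≤ x
        · rw [if_pos h2, if_pos (show lo ≤ x by omega)]
        · rw [if_neg h2]
          by_cases h1 : lo ≤ x
          · rw [if_pos h1, hconst x h1 (by omega), max_eq_left (by omega)]
          · rw [if_neg h1]
    · rw [dif_neg h]
      have : ¬ lo ≤ x := by omega
      simp [this]

-- total cost at multiplier x of all (bucket, vat) pairs
def pvS (pairs : List (Int × Int)) (x : Int) : Int := (pairs.map (fun bv => pvCp bv.1 bv.2 x)).sum

-- folding addPair over all pairs makes the prefix sums of the diff table equal to pvS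
theorem pvZip_prefix (mx x : Int) (hx1 : 1 ≤ x) (hx2 : x ≤ mx) :
    ∀ (pairs : List (Int × Int)) (diff : Int → Int),
    pvPf (pairs.foldl (fun d bv => addPair mx bv.1 bv.2 1 d) diff) x.toNat
      = pvPf diff x.toNat + pvS pairs x := by
  intro pairs
  induction pairs with
  | nil => intro diff; simp [pvS]
  | cons p t ih =>
    intro diff
    simp only [List.foldl_cons]
    rw [ih]
    rw [addPair_prefix mx p.1 p.2 x hx1 hx2 (mx + 1 - 1).toNat 1 diff (by omega) (by omega)]
    simp only [if_pos hx1]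
    unfold pvS
    simp only [List.map_cons, List.sum_cons]
    ring

-- A's inner loop over zip(bucket, vat) is x plus the total cost pvS
theorem pvA_inner (pairs : List (Int × Int)) (x : Int) (hx : 0 < x) :
    pairs.foldl (fun tmp bv => tmp + max 0 (PySem.Int.floordiv (bv.2 + x - 1) x - bv.1)) x
      = x + pvS pairs x := by
  rw [PySem.List.foldl_add pairs (fun bv => max 0 (PySem.Int.floordiv (bv.2 + x - 1) x - bv.1)) x]
  unfold pvS
  congr 1
  congr 1
  apply List.map_congr_left
  intro bv _
  unfold pvCp
  rw [pvCeilA_eq bv.2 x hx]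

-- the sweep invariant: B's running pair = (A's running min, prefix of the diff table)
theorem pvSweep (mx : Int) (bucket vat : List Int)
    (diff : Int → Int)
    (hdiff : diff = (List.zip bucket vat).foldl (fun d bv => addPair mx bv.1 bv.2 1 d) (fun _ => 0)) :
    ∀ (k : Nat), (k : Int) ≤ mx →
    (PySem.List.pyRange 1 ((k : Int) + 1) 1).foldl
        (fun (p : Int × Int) x => (min p.1 (x + (p.2 + diff x)), p.2 + diff x)) (10 ^ 4 + 1, 0)
      = ((PySem.List.pyRange 1 ((k : Int) + 1) 1).foldl
          (fun ans x => min ans ((List.zip bucket vat).foldl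
            (fun tmp bv => tmp + max 0 (PySem.Int.floordiv (bv.2 + x - 1) x - bv.1)) x)) (10 ^ 4 + 1),
         pvPf diff k) := by
  intro k
  induction k with
  | zero =>
    intro _
    rw [PySem.List.pyRange_one_eq_nil (by omega)]
    simp [pvPf]
  | succ k ih =>
    intro hk
    have hk' : (k : Int) ≤ mx := by push_cast at hk ⊢; omega
    have hcast : ((k + 1 : Nat) : Int) = (k : Int) + 1 := by push_cast; ring
    rw [hcast, PySem.List.pyRange_one_succ_right (by omega), List.foldl_append, List.foldl_append,
        ih hk']
    simp only [List.foldl_cons, List.foldl_nil]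
    have hx1 : (1 : Int) ≤ (k : Int) + 1 := by omega
    have hx2 : (k : Int) + 1 ≤ mx := by push_cast at hk; omega
    have htoNat : ((k : Int) + 1).toNat = k + 1 := by omega
    have hpre : pvPf diff k + diff ((k : Int) + 1) = pvS (List.zip bucket vat) ((k : Int) + 1) := by
      have h1 : pvPf diff (k + 1) = pvPf diff k + diff ((k : Int) + 1) := by
        rw [pvPf_succ]; ring_nf
      have h2 := pvZip_prefix mx ((k : Int) + 1) hx1 hx2 (List.zip bucket vat) (fun _ => 0)
      rw [htoNat, ← hdiff] at h2
      rw [← h1, h2]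
      simp [pvPf]
    rw [hpre, pvA_inner (List.zip bucket vat) ((k : Int) + 1) (by omega)]
    have h3 : pvPf diff (k + 1) = pvS (List.zip bucket vat) ((k : Int) + 1) := by
      rw [pvPf_succ, show (1 : Int) + (k : Int) = (k : Int) + 1 by ring]
      exact hpre
    rw [h3]

-- ===== VERDICT (by name: the statement is the Claim_ definition above) =====
theorem storeWater_spec : Claim_equal_storeWater := by
  intro bucket vat _ hpre
  unfold Spec_storeWater storeWater storeWater_alt
  match hvat : PySem.List.max? vat (fun y => y) with
  | none =>
    exact absurd ((PySem.List.max?_eq_none_iff vat (fun y => y)).mp hvat) hpre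
  | some mx =>
    by_cases hmx0 : mx = 0
    · simp [hmx0]
    · simp only [hmx0, if_false]
      by_cases hmxneg : mx < 0
      · rw [PySem.List.pyRange_one_eq_nil (by omega)]
        simp
      · have hmxpos : 0 < mx := by omega
        have hk : ((mx.toNat : Int)) = mx := by omega
        have := pvSweep mx bucket vat
          ((List.zip bucket vat).foldl (fun d bv => addPair mx bv.1 bv.2 1 d) (fun _ => 0)) rfl
          mx.toNat (by omega)
        rw [hk] at this
        simp only [this]
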